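-- pv_equiv track=rewrite | github.com/VarshithAdepu/hindi_generation | add_fun.py | add_spkview
-- ===== SOURCE A (Python) =====
-- def add_spkview(full_data, spkview_dict):
--     transformed_data = []
--     for data in full_data:
--         index = data[0]
--         if index in spkview_dict:
--             temp = list(data)
--             spkview_info = spkview_dict[index]
--             for info in spkview_info:
--                 tag = info[0]
--                 val = info[1]
--                 if tag == 'before':
--                     temp[1] = val + ' ' + temp[1]
--                 elif tag == 'after':
--                     temp[1] = temp[1] + ' ' + val
--                 data = tuple(temp)
--         transformed_data.append(data)
--     return transformed_data
-- ===== SOURCE B (Python) =====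
-- def _transform(data, spkview_dict):
--     index, text = data
--     if index not in spkview_dict:
--         return data
--     infos = spkview_dict[index]
--     befores = [v for t, v in infos if t == 'before']
--     afters = [v for t, v in infos if t == 'after']
--     return (index, ' '.join(list(reversed(befores)) + [text] + afters))
--
--
-- def add_spkview(full_data, spkview_dict):
--     return [_transform(data, spkview_dict) for data in full_data]
-- ===== Notes on version B (the rewrite author's own statement) =====
-- stated objective: simpler
-- what changed: Replaces A's cumulative in-place string concatenation inside a tag-by-tag loop with a single gather of 'before'/'after' values into two lists followed by one ' '.join, expressed as a per-element transform mapped over the input.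
import Mathlib
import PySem

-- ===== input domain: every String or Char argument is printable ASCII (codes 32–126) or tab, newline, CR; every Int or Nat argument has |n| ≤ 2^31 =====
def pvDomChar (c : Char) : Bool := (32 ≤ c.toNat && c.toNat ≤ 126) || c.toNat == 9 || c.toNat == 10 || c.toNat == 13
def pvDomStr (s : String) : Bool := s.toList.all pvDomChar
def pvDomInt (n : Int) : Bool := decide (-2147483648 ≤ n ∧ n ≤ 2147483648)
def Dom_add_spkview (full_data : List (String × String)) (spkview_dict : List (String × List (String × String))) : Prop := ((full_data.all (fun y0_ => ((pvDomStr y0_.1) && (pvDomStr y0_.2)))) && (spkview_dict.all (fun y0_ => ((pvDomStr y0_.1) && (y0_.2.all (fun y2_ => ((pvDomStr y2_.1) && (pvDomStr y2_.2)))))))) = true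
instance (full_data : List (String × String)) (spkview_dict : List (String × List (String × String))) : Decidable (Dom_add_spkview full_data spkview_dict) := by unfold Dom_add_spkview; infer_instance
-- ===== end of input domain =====

-- B gathers the 'before'/'after' values once and assembles element 1 with a single
-- ' '.join instead of A's cumulative in-place concatenation; objective: simpler.

-- ===== PORT A =====
-- literal transliteration of A: append-loop over full_data; on a dict hit, an inner
-- tag-by-tag loop rewrites the second component by string concatenation.
def add_spkview (full_data : List (String × String)) (spkview_dict : List (String × List (String × String))) : List (String × String) :=
  full_data.foldl (fun transformed_data data =>
    let index := data.1
    match (PySem.Dict.mk spkview_dict).get? index with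
    | some spkview_info =>
        let data' := spkview_info.foldl (fun temp info =>
            let tag := info.1
            let val := info.2
            if tag = "before" then (temp.1, val ++ " " ++ temp.2)
            else if tag = "after" then (temp.1, temp.2 ++ " " ++ val)
            else temp) data
        transformed_data ++ [data']
    | none => transformed_data ++ [data]) []

-- ===== PORT B =====
-- per-element transform: filter out the before/after values, then one join
def pvTransform (spkview_dict : List (String × List (String × String))) (data : String × String) : String × String :=
  match (PySem.Dict.mk spkview_dict).get? data.1 with
  | none => data
  | some infos =>
      let befores := (infos.filter (fun i => i.1 == "before")).map (·.2)
      let afters := (infos.filter (fun i => i.1 == "after")).map (·.2)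
      (data.1, PySem.Str.join " " (befores.reverse ++ [data.2] ++ afters))

def add_spkview_alt (full_data : List (String × String)) (spkview_dict : List (String × List (String × String))) : List (String × String) :=
  full_data.map (pvTransform spkview_dict)

-- ===== PRECONDITION & SPEC =====
def Spec_add_spkview (full_data : List (String × String)) (spkview_dict : List (String × List (String × String))) (out : List (String × String)) : Prop := out = add_spkview_alt full_data spkview_dict
instance (full_data : List (String × String)) (spkview_dict : List (String × List (String × String))) (out : List (String × String)) : Decidable (Spec_add_spkview full_data spkview_dict out) := by unfold Spec_add_spkview; infer_instance

-- ===== CLAIM (what is proved, stated in full; the proofs are below) =====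
def Claim_equal_add_spkview : Prop := ∀ (full_data : List (String × String)) (spkview_dict : List (String × List (String × String))), Dom_add_spkview full_data spkview_dict → Spec_add_spkview full_data spkview_dict (add_spkview full_data spkview_dict)

-- ===== LEMMAS AND PROOFS =====

-- joining with an adjacent pair already glued by the separator is the same join
lemma chars_join_merge (sep a b : List Char) (xs ys : List (List Char)) :
    PySem.Chars.join sep (xs ++ (a ++ sep ++ b) :: ys)
      = PySem.Chars.join sep (xs ++ a :: b :: ys) := by
  induction xs with
  | nil =>
      cases ys with
      | nil => simp [PySem.Chars.join, List.intercalate, List.append_assoc]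
      | cons c ys' => simp [PySem.Chars.join_cons_cons, List.append_assoc]
  | cons x xs' ih =>
      rcases xs' with _ | ⟨x', t⟩
      · simp only [List.nil_append, List.cons_append] at *
        rw [PySem.Chars.join_cons_cons, PySem.Chars.join_cons_cons, ih]
      · simp only [List.cons_append] at *
        rw [PySem.Chars.join_cons_cons, PySem.Chars.join_cons_cons, ih]

lemma str_join_merge (a b : String) (xs ys : List String) :
    PySem.Str.join " " (xs ++ (a ++ " " ++ b) :: ys)
      = PySem.Str.join " " (xs ++ a :: b :: ys) := by
  apply String.toList_inj.mp
  simp only [PySem.Str.toList_join, List.map_append, List.map_cons, String.toList_append]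
  exact chars_join_merge _ _ _ _ _

-- the inner tag loop of A computes exactly B's gather-then-join result
lemma inner_loop_eq (infos : List (String × String)) (p : String × String) :
    infos.foldl (fun temp info =>
        let tag := info.1
        let val := info.2
        if tag = "before" then (temp.1, val ++ " " ++ temp.2)
        else if tag = "after" then (temp.1, temp.2 ++ " " ++ val)
        else temp) p
      = (p.1, PySem.Str.join " "
          (((infos.filter (fun i => i.1 == "before")).map (·.2)).reverse
            ++ [p.2] ++ (infos.filter (fun i => i.1 == "after")).map (·.2))) := by
  induction infos generalizing p with
  | nil => simp [PySem.Str.join, PySem.Chars.join, List.intercalate]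
  | cons info rest ih =>
      simp only [List.foldl_cons, ih, List.filter_cons]
      by_cases hb : info.1 = "before"
      · simp [hb]
        exact str_join_merge info.2 p.2 _ _
      · by_cases ha : info.1 = "after"
        · simp [ha]
          exact str_join_merge p.2 info.2 _ _
        · simp [hb, ha]

-- one step of A's outer loop equals B's per-element transform
lemma step_eq (spkview_dict : List (String × List (String × String))) (data : String × String) :
    (match (PySem.Dict.mk spkview_dict).get? data.1 with
      | some spkview_info =>
          spkview_info.foldl (fun temp info =>
            let tag := info.1
            let val := info.2
            if tag = "before" then (temp.1, val ++ " " ++ temp.2)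
            else if tag = "after" then (temp.1, temp.2 ++ " " ++ val)
            else temp) data
      | none => data)
      = pvTransform spkview_dict data := by
  unfold pvTransform
  cases (PySem.Dict.mk spkview_dict).get? data.1 with
  | none => rfl
  | some infos => simpa using inner_loop_eq infos data

-- ===== VERDICT (by name: the statement is the Claim_ definition above) =====
theorem add_spkview_spec : Claim_equal_add_spkview := by
  intro full_data spkview_dict _
  unfold Spec_add_spkview add_spkview add_spkview_alt
  have h : (fun (transformed_data : List (String × String)) (data : String × String) =>
      match (PySem.Dict.mk spkview_dict).get? data.1 with
      | some spkview_info =>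
          transformed_data ++ [spkview_info.foldl (fun temp info =>
            let tag := info.1
            let val := info.2
            if tag = "before" then (temp.1, val ++ " " ++ temp.2)
            else if tag = "after" then (temp.1, temp.2 ++ " " ++ val)
            else temp) data]
      | none => transformed_data ++ [data])
      = fun transformed_data data => transformed_data ++ [pvTransform spkview_dict data] := by
    funext acc data
    rw [← step_eq spkview_dict data]
    cases (PySem.Dict.mk spkview_dict).get? data.1 <;> rfl
  simp only [h]
  exact PySem.List.foldl_append_singleton_eq_map (pvTransform spkview_dict) full_data []
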